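-- pv_equiv track=rewrite | github.com/Lynx-Eco/py__fnWhisperTokenizer | all.inline.test.inputs.txt.py | overlapIndex
-- ===== SOURCE A (Python) =====
-- def zip_last_first(prompt, transcription, n):
--     # Zip the last n elements of `prompt` with the first n elements of `transcription`
--     return list(zip(prompt[-n:], transcription[:n]))
--
-- def count_matching_tuples(tuples_list):
--     # Function to remove periods and commas, and to make the string lowercase
--     def clean_string(s):
--         return s.replace('.', '').replace(',', '').lower()
--
--     # Count the number of tuples where the cleaned strings match
--     return sum([clean_string(left) == clean_string(right) for left, right in tuples_list])
--
-- def overlapIndex(prompt, transcription):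
--     maxOverlap = min(len(prompt), len(transcription))
--     bestMatch = 0
--     bestMatchIndex = 0
--     for i in range(1, maxOverlap + 1):
--         thisZip = zip_last_first(prompt, transcription, i)
--         # thisMatches = count_matching_tuples(thisZip)
--         thisMatches = count_matching_tuples(thisZip)
--         if thisMatches > bestMatch:
--             bestMatch = thisMatches
--             bestMatchIndex = i
--     return bestMatchIndex
-- ===== SOURCE B (Python) =====
-- def overlapIndex(prompt, transcription):
--     def clean(s):
--         return s.replace('.', '').replace(',', '').lower()
--
--     lp = len(prompt)
--     maxOverlap = min(lp, len(transcription))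
--     # clean each token ONCE and index transcription positions by cleaned value
--     index = {}
--     for t, s in enumerate(transcription):
--         v = clean(s)
--         index[v] = index.get(v, []) + [t]
--     # every matching (prompt pos p, transcription pos t) pair contributes to
--     # exactly one overlap length i = lp - p + t; bump that counter
--     counts = {}
--     for p, s in enumerate(prompt):
--         for t in index.get(clean(s), []):
--             i = lp - p + t
--             counts[i] = counts.get(i, 0) + 1
--     best = 0
--     bestIndex = 0
--     for i in range(1, maxOverlap + 1):
--         c = counts.get(i, 0)
--         if c > best:
--             best = c
--             bestIndex = i
--     return bestIndex
-- ===== Notes on version B (the rewrite author's own statement) =====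
-- stated objective: faster
-- what changed: A rescans every overlap length i, re-cleaning all zipped tokens each time (O(n^2) cleanings and comparisons); B cleans each token once, indexes transcription positions by cleaned value in a dict, bumps one per-overlap counter per matching token pair (overlap key i = len(prompt) - p + t), and then takes the first argmax over 1..maxOverlap.
import Mathlib
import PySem

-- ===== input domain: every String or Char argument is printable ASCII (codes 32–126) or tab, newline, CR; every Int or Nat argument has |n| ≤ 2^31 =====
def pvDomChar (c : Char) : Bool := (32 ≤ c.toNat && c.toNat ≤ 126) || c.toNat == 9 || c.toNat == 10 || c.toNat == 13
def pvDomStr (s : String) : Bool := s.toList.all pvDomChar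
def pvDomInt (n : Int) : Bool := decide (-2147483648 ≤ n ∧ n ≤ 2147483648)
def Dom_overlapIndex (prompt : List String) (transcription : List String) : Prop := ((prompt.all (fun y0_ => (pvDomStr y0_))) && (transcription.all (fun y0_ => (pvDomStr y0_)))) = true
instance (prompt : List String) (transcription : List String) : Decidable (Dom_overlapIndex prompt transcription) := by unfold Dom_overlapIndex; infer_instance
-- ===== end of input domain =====

-- B replaces A's scan of all overlap lengths (re-cleaning every token at every length) by:
-- clean each token once, index transcription positions by cleaned value, bump one per-overlap
-- counter per matching token pair (overlap i = lp - p + t), then take the first argmax (faster).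

-- shared helper: clean_string(s) = s.replace('.', '').replace(',', '').lower()
def pvClean (s : String) : String :=
  PySem.Str.lower (PySem.Str.replace (PySem.Str.replace s "." "") "," "")

-- ===== PORT A =====
def zip_last_first (prompt transcription : List String) (n : Int) : List (String × String) :=
  (PySem.List.slice prompt (some (-n)) none).zip (PySem.List.slice transcription none (some n))

def count_matching_tuples (l : List (String × String)) : Int :=
  (l.map (fun p => if pvClean p.1 == pvClean p.2 then (1 : Int) else 0)).sum

def overlapIndex (prompt : List String) (transcription : List String) : Int :=
  let maxOverlap : Int := min (prompt.length : Int) (transcription.length : Int)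
  let r := (PySem.List.pyRange 1 (maxOverlap + 1)).foldl
    (fun (st : Int × Int) i =>
      let thisMatches := count_matching_tuples (zip_last_first prompt transcription i)
      if st.1 < thisMatches then (thisMatches, i) else st) (0, 0)
  r.2

-- ===== PORT B =====
def overlapIndex_alt (prompt : List String) (transcription : List String) : Int :=
  let lp : Int := prompt.length
  let maxOverlap : Int := min lp (transcription.length : Int)
  -- index[v] = index.get(v, []) + [t]
  let index : PySem.Dict String (List Int) :=
    (PySem.List.enumerate transcription).foldl
      (fun d pr => d.modify (pvClean pr.2) [] (fun l => l ++ [pr.1]))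
      PySem.Dict.empty
  -- counts[i] = counts.get(i, 0) + 1 with i = lp - p + t over matching pairs (p, t)
  let counts : PySem.Dict Int Int :=
    (PySem.List.enumerate prompt).foldl
      (fun c pr =>
        (index.getD (pvClean pr.2) []).foldl
          (fun c t => c.modify (lp - pr.1 + t) 0 (fun n => n + 1)) c)
      PySem.Dict.empty
  let r := (PySem.List.pyRange 1 (maxOverlap + 1)).foldl
    (fun (st : Int × Int) i =>
      let c := counts.getD i 0
      if st.1 < c then (c, i) else st) (0, 0)
  r.2

-- ===== PRECONDITION & SPEC =====
def Spec_overlapIndex (prompt : List String) (transcription : List String) (out : Int) : Prop := out = overlapIndex_alt prompt transcription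
instance (prompt : List String) (transcription : List String) (out : Int) : Decidable (Spec_overlapIndex prompt transcription out) := by unfold Spec_overlapIndex; infer_instance

-- ===== CLAIM (what is proved, stated in full; the proofs are below) =====
def Claim_equal_overlapIndex : Prop := ∀ (prompt : List String) (transcription : List String), Dom_overlapIndex prompt transcription → Spec_overlapIndex prompt transcription (overlapIndex prompt transcription)

-- ===== LEMMAS AND PROOFS =====

-- sum of a 0/1 map is countP
theorem pv_sum_map_ite {α : Type} (p : α → Bool) (l : List α) :
    (l.map (fun x => if p x then (1 : Nat) else 0)).sum = l.countP p := by
  induction l with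
  | nil => simp
  | cons x l ih => by_cases h : p x <;> simp [h, ih, Nat.add_comm]

-- countP over a zip, as countP over the index range
theorem pv_countP_zip {α : Type} (P : α → α → Bool) (d : α) (xs : List α) : ∀ (ys : List α),
    (xs.zip ys).countP (fun p => P p.1 p.2)
      = (List.range (min xs.length ys.length)).countP
          (fun t => P (xs.getD t d) (ys.getD t d)) := by
  induction xs with
  | nil => intro ys; simp
  | cons x xs ih =>
    intro ys
    cases ys with
    | nil => simp
    | cons y ys =>
      have hmin : min (x :: xs).length (y :: ys).length = min xs.length ys.length + 1 := by
        simp [Nat.succ_min_succ]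
      rw [hmin, List.range_succ_eq_map]
      simp only [List.zip_cons_cons, List.countP_cons, List.countP_map]
      rw [ih ys]
      by_cases h : P x y <;> simp [h, Function.comp_def]

-- A's per-overlap count, as a countP over positions
theorem pv_countA (prompt transcription : List String) (k : Nat) (h1 : 1 ≤ k)
    (hp : k ≤ prompt.length) (ht : k ≤ transcription.length) :
    count_matching_tuples (zip_last_first prompt transcription (k : Int))
      = ((List.range k).countP (fun t =>
          pvClean (prompt.getD (prompt.length - k + t) "") == pvClean (transcription.getD t "")) : Int) := by
  unfold zip_last_first count_matching_tuples
  rw [PySem.List.slice_from_neg_natCast prompt k (by omega), PySem.List.slice_to_natCast]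
  rw [PySem.List.sum_map_ite_one_zero (fun p : String × String => pvClean p.1 == pvClean p.2)]
  rw [pv_countP_zip (fun a b => pvClean a == pvClean b) ""]
  have hlen : min (List.drop (prompt.length - k) prompt).length (List.take k transcription).length = k := by
    simp [List.length_drop, List.length_take]; omega
  rw [hlen]
  refine congrArg (fun n : Nat => (n : Int)) ?_
  apply List.countP_congr
  intro t htmem
  have htk : t < k := List.mem_range.mp htmem
  have h₁ : (List.drop (prompt.length - k) prompt).getD t "" = prompt.getD (prompt.length - k + t) "" := by
    simp [List.getD_eq_getElem?_getD, List.getElem?_drop]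
  have h₂ : (List.take k transcription).getD t "" = transcription.getD t "" := by
    simp [List.getD_eq_getElem?_getD, htk]
  rw [h₁, h₂]

-- B's index dict: the positions of each cleaned value, in order
theorem pv_index_getD (transcription : List String) (v : String) :
    ((PySem.List.enumerate transcription).foldl
        (fun d pr => d.modify (pvClean pr.2) [] (fun l => l ++ [pr.1]))
        PySem.Dict.empty).getD v []
      = List.map (fun t : Nat => (t : Int)) ((List.range transcription.length).filter
          (fun t => pvClean (transcription.getD t "") == v)) := by
  have hfold :
      (PySem.List.enumerate transcription).foldl
        (fun d pr => d.modify (pvClean pr.2) [] (fun l => l ++ [pr.1]))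
        PySem.Dict.empty
      = (((PySem.List.enumerate transcription).map (fun pr => (pvClean pr.2, pr.1))).foldl
          (fun d p => d.modify p.1 [] (fun l => l ++ [p.2])) PySem.Dict.empty) := by
    rw [List.foldl_map]
  rw [hfold, PySem.Dict.getD_foldl_modify_append]
  have henum : PySem.List.enumerate transcription
      = (List.range transcription.length).map
          (fun t : Nat => ((t : Int), transcription.getD t "")) := by
    rw [PySem.List.enumerate_eq_map_pyRange transcription ""]
    simp only [PySem.List.len_eq, PySem.List.pyRange_zero_nat, List.map_map]
    refine List.map_congr_left ?_
    intro t _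
    simp [PySem.List.pyGetD_natCast]
  rw [henum]
  simp [List.map_map, List.filter_map, Function.comp_def, PySem.Dict.getD_empty]

-- the same fact for any list of tokens (used for the prompt side)
theorem pv_enum_eq (xs : List String) : PySem.List.enumerate xs
    = (List.range xs.length).map (fun t : Nat => ((t : Int), xs.getD t "")) := by
  rw [PySem.List.enumerate_eq_map_pyRange xs ""]
  simp only [PySem.List.len_eq, PySem.List.pyRange_zero_nat, List.map_map]
  refine List.map_congr_left ?_
  intro t _
  simp [PySem.List.pyGetD_natCast]

-- a nested counting fold is a count over the flattened key list
theorem pv_getD_foldl_foldl {α : Type} (keys : α → List Int) (L : List α) :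
    ∀ (c : PySem.Dict Int Int) (i : Int),
    (L.foldl (fun c a => (keys a).foldl (fun c x => c.modify x 0 (fun n => n + 1)) c) c).getD i 0
      = c.getD i 0 + ((L.flatMap keys).count i : Int) := by
  induction L with
  | nil => intro c i; simp
  | cons a L ih =>
    intro c i
    simp only [List.foldl_cons, List.flatMap_cons, List.count_append]
    rw [ih, PySem.Dict.getD_foldl_modify_add_one (keys a) c i]
    push_cast
    ring

-- countP over a range with at most one possible witness
theorem pv_countP_range_unique (n : Nat) (P : Nat → Bool) (t0 : Nat)
    (h : ∀ t, t < n → P t = true → t = t0) :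
    (List.range n).countP P = if t0 < n ∧ P t0 = true then 1 else 0 := by
  induction n with
  | zero => simp
  | succ n ih =>
    rw [List.range_succ, List.countP_append]
    have hsub : ∀ t, t < n → P t = true → t = t0 := fun t ht => h t (by omega)
    by_cases hPn : P n = true
    · have hn : n = t0 := h n (by omega) hPn
      subst hn
      have hz : (List.range n).countP P = 0 := by
        rw [List.countP_eq_zero]
        intro a ha hPa
        have hlt := List.mem_range.mp ha
        exact absurd (h a (by omega) hPa) (by omega)
      simp [hz, hPn]
    · have h2 : ([n].countP P) = 0 := by simp [hPn]
      rw [h2, ih hsub]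
      by_cases ht0 : t0 < n
      · simp [ht0, Nat.lt_succ_of_lt ht0]
      · have hnot1 : ¬ (t0 < n ∧ P t0 = true) := fun hx => ht0 hx.1
        have hnot2 : ¬ (t0 < n + 1 ∧ P t0 = true) := by
          rintro ⟨hlt, hPt⟩
          have ht0n : t0 = n := by omega
          subst ht0n; exact hPn hPt
        simp only [hnot1, hnot2, if_false]

-- B's counter at key k equals A's per-overlap count
theorem pv_countB (prompt transcription : List String) (k : Nat) (_h1 : 1 ≤ k)
    (hp : k ≤ prompt.length) (ht : k ≤ transcription.length) :
    (((PySem.List.enumerate prompt).foldl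
        (fun c pr =>
          ((((PySem.List.enumerate transcription).foldl
              (fun d pr => d.modify (pvClean pr.2) [] (fun l => l ++ [pr.1]))
              PySem.Dict.empty)).getD (pvClean pr.2) []).foldl
            (fun c t => c.modify ((prompt.length : Int) - pr.1 + t) 0 (fun n => n + 1)) c)
        PySem.Dict.empty).getD (k : Int) 0)
      = ((List.range k).countP (fun t =>
          pvClean (prompt.getD (prompt.length - k + t) "") == pvClean (transcription.getD t "")) : Int) := by
  set lp := prompt.length with hlp
  set lt := transcription.length with hlt
  set idx := ((PySem.List.enumerate transcription).foldl
      (fun d pr => d.modify (pvClean pr.2) [] (fun l => l ++ [pr.1]))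
      PySem.Dict.empty) with hidx
  -- rewrite the inner fold over t as a fold over mapped keys
  have hfun : (fun (c : PySem.Dict Int Int) (pr : Int × String) =>
        (idx.getD (pvClean pr.2) []).foldl
          (fun c t => c.modify ((lp : Int) - pr.1 + t) 0 (fun n => n + 1)) c)
      = (fun c pr =>
        ((idx.getD (pvClean pr.2) []).map (fun t => (lp : Int) - pr.1 + t)).foldl
          (fun c x => c.modify x 0 (fun n => n + 1)) c) := by
    funext c pr
    rw [List.foldl_map]
  rw [hfun, pv_getD_foldl_foldl (fun pr : Int × String =>
      ((idx.getD (pvClean pr.2) []).map (fun t => (lp : Int) - pr.1 + t)))]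
  rw [PySem.Dict.getD_empty]
  rw [List.count_eq_countP, List.countP_flatMap]
  rw [pv_enum_eq prompt, List.map_map]
  -- per-position count
  have hG : ∀ p : Nat, p < lp →
      (((List.countP (fun x => x == (k : Int)) ∘
        (fun pr : Int × String => ((idx.getD (pvClean pr.2) []).map (fun t => (lp : Int) - pr.1 + t)))) ∘
        (fun t : Nat => ((t : Int), prompt.getD t ""))) p)
      = (List.range lt).countP (fun tn : Nat =>
          (((lp : Int) - p + (tn : Int) == (k : Int))) &&
          (pvClean (transcription.getD tn "") == pvClean (prompt.getD p ""))) := by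
    intro p hplt
    simp only [Function.comp_apply]
    rw [pv_index_getD]
    simp only [List.countP_map, List.countP_filter, Function.comp_def]
    rfl
  have hsplit : lp = (lp - k) + k := (Nat.sub_add_cancel hp).symm
  rw [List.map_congr_left (fun p hm => hG p (List.mem_range.mp hm))]
  -- split the positions at lp - k
  have hr : List.range lp = List.range (lp - k) ++ (List.range k).map (fun x => (lp - k) + x) := by
    conv_lhs => rw [hsplit]
    exact List.range_add
  rw [hr, List.map_append, List.sum_append, List.map_map]
  -- positions before lp - k contribute nothing
  have hzero : ((List.range (lp - k)).map (fun p : Nat => (List.range lt).countP (fun tn : Nat =>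
      (((lp : Int) - (p : Int) + (tn : Int) == (k : Int))) &&
      (pvClean (transcription.getD tn "") == pvClean (prompt.getD p ""))))).sum = 0 := by
    apply List.sum_eq_zero
    intro x hx
    rcases List.mem_map.mp hx with ⟨p, hpmem, hxeq⟩
    have hplt : p < lp - k := List.mem_range.mp hpmem
    rw [← hxeq]
    rw [List.countP_eq_zero]
    intro tn _ hq
    simp only [Bool.and_eq_true, beq_iff_eq] at hq
    have := hq.1
    omega
  rw [hzero]
  -- position lp - k + j contributes exactly the match bit at offset j
  have hone : ∀ j : Nat, j < k →
      ((fun p : Nat => (List.range lt).countP (fun tn : Nat =>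
        (((lp : Int) - (p : Int) + (tn : Int) == (k : Int))) &&
        (pvClean (transcription.getD tn "") == pvClean (prompt.getD p "")))) ∘ (fun x => lp - k + x)) j
      = (if pvClean (transcription.getD j "") == pvClean (prompt.getD (lp - k + j) "") then (1 : Nat) else 0) := by
    intro j hj
    simp only [Function.comp_apply]
    rw [pv_countP_range_unique lt _ j ?huniq]
    case huniq =>
      intro t _ hPt
      simp only [Bool.and_eq_true, beq_iff_eq] at hPt
      have := hPt.1
      have hcast : ((lp - k + j : Nat) : Int) = (lp : Int) - k + j := by
        push_cast [Nat.cast_sub hp]; ring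
      omega
    have hjlt : j < lt := by omega
    have harith : (lp : Int) - (((lp - k : Nat) : Int) + (j : Int)) + (j : Int) = (k : Int) := by
      push_cast [Nat.cast_sub hp]
      ring
    by_cases hC : pvClean (transcription.getD j "") = pvClean (prompt.getD (lp - k + j) "")
    · simp only [List.getD_eq_getElem?_getD] at hC
      simp [hjlt, harith, hC]
    · simp only [List.getD_eq_getElem?_getD] at hC
      simp [hjlt, harith, hC]
  rw [List.map_congr_left (fun j hm => hone j (List.mem_range.mp hm))]
  rw [pv_sum_map_ite]
  simp only [zero_add]
  refine congrArg (fun n : Nat => (n : Int)) ?_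
  apply List.countP_congr
  intro t htm
  constructor <;> intro hx <;> simp only [beq_iff_eq] at hx ⊢ <;> exact hx.symm

-- the two programs agree everywhere
theorem pv_overlapIndex_eq (prompt transcription : List String) :
    overlapIndex prompt transcription = overlapIndex_alt prompt transcription := by
  unfold overlapIndex overlapIndex_alt
  refine congrArg Prod.snd ?_
  apply PySem.List.foldl_congr_mem
  intro acc x hx
  rcases PySem.List.mem_pyRange_one.mp hx with ⟨hx1, hx2⟩
  have hx0 : 0 ≤ x := by omega
  have hxk : x = ((x.toNat : Nat) : Int) := (Int.toNat_of_nonneg hx0).symm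
  set k : Nat := x.toNat with hk
  have hk1 : 1 ≤ k := by omega
  have hkp : k ≤ prompt.length := by omega
  have hkt : k ≤ transcription.length := by omega
  have hcore : count_matching_tuples (zip_last_first prompt transcription x)
      = (((PySem.List.enumerate prompt).foldl
        (fun c pr =>
          ((((PySem.List.enumerate transcription).foldl
              (fun d pr => d.modify (pvClean pr.2) [] (fun l => l ++ [pr.1]))
              PySem.Dict.empty)).getD (pvClean pr.2) []).foldl
            (fun c t => c.modify ((prompt.length : Int) - pr.1 + t) 0 (fun n => n + 1)) c)
        PySem.Dict.empty).getD x 0) := by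
    rw [hxk]
    rw [pv_countA prompt transcription k hk1 hkp hkt, pv_countB prompt transcription k hk1 hkp hkt]
  simp only [hcore]

-- ===== VERDICT (by name: the statement is the Claim_ definition above) =====
theorem overlapIndex_spec : Claim_equal_overlapIndex := by
  intro prompt transcription _
  exact pv_overlapIndex_eq prompt transcription
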